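-- pv_equiv track=rewrite | github.com/Diaboloss712/CodingTest | 프로그래머스/2/389480. 완전범죄/완전범죄.py | solution
-- ===== SOURCE A (Python) =====
-- def solution(info, n, m):
--     answer = -1
--     length = len(info)
--     dp = [set() for _ in range(length)]
--
--     if info[0][0] < n:
--         dp[0].add((info[0][0], 0))
--     if info[0][1] < m:
--         dp[0].add((0, info[0][1]))
--     for i in range(1, length):
--         for data in dp[i - 1]:
--             A_clue = data[0] + info[i][0], data[1]
--             B_clue = data[0], data[1] + info[i][1]
--             if A_clue[0] < n:
--                 dp[i].add(A_clue)
--             if B_clue[1] < m: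
--                 dp[i].add(B_clue)
--     if dp[length - 1]:
--         answer = min(dp[length - 1], key=lambda x: x[0])[0]
--     return answer
-- ===== SOURCE B (Python) =====
-- def solution(info, n, m):
--     # 1-D DP: map "total A-evidence" -> minimum total B-evidence achieving it.
--     dp = {0: 0}
--     for item in info:
--         ai, bi = item[0], item[1]
--         ndp = {}
--         for a, b in dp.items():
--             na = a + ai
--             if na < n:
--                 v = ndp.get(na)
--                 if v is None or b < v:
--                     ndp[na] = b
--             nb = b + bi
--             if nb < m:
--                 v = ndp.get(a)
--                 if v is None or nb < v:
--                     ndp[a] = nb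
--         dp = ndp
--     return min(dp) if dp else -1
-- ===== Notes on version B (the rewrite author's own statement) =====
-- stated objective: faster
-- what changed: Replaces A's per-level set of (A-evidence, B-evidence) pairs by a dictionary keeping only the minimum B-evidence for each A-evidence total (dominated pairs dropped), seeded uniformly with {0:0} instead of a special first row.
-- outside the precondition, e.g. on solution([[5, 5], [7]], 1, 1): A returns -1, B raises IndexError
import Mathlib
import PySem

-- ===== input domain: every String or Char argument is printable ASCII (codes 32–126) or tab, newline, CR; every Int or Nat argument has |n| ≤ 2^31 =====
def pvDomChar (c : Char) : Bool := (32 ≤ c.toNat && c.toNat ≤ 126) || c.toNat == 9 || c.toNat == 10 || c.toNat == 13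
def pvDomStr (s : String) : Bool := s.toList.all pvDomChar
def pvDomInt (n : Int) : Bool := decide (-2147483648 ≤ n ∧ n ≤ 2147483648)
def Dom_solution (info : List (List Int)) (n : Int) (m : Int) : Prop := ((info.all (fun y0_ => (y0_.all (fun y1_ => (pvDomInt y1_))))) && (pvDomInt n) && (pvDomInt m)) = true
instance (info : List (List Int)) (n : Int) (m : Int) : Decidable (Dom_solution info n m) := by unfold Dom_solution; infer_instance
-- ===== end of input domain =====

-- B replaces A's per-level set of (A,B)-evidence pairs by a dict keeping only the minimum
-- B-evidence per A-evidence total (an asymptotically smaller frontier); equivalence of the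
-- RETURN values is proved on Pre_ below.

-- ===== PORT A =====
-- inner loop body: from pair `data`, add A_clue / B_clue into the set `cur` under the thresholds
def childA (n m ai bi : Int) (cur : PySem.Set (Int × Int)) (data : Int × Int) : PySem.Set (Int × Int) :=
  let cur1 := if data.1 + ai < n then PySem.Set.add cur (data.1 + ai, data.2) else cur
  if data.2 + bi < m then PySem.Set.add cur1 (data.1, data.2 + bi) else cur1

-- one iteration of A's outer loop: dp[i] built from dp[i-1]
def stepA (n m ai bi : Int) (prev : PySem.Set (Int × Int)) : PySem.Set (Int × Int) :=
  prev.foldl (childA n m ai bi) PySem.Set.empty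

def solution (info : List (List Int)) (n : Int) (m : Int) : Int :=
  match info with
  | [] => -1  -- Python raises IndexError on info[0] here (excluded by Pre_)
  | first :: rest =>
    -- row accesses via pyGetD: exact whenever the row has ≥ 2 entries (guaranteed by Pre_)
    let a0 := PySem.List.pyGetD first 0 0
    let b0 := PySem.List.pyGetD first 1 0
    let d0 : PySem.Set (Int × Int) := PySem.Set.empty
    let d1 := if a0 < n then PySem.Set.add d0 (a0, 0) else d0
    let d2 := if b0 < m then PySem.Set.add d1 (0, b0) else d1
    let last := rest.foldl (fun prev row =>
        stepA n m (PySem.List.pyGetD row 0 0) (PySem.List.pyGetD row 1 0) prev) d2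
    match PySem.List.min? last (fun x => x.1) with
    | some p => p.1   -- answer = min(dp[length-1], key=lambda x: x[0])[0]
    | none => -1      -- dp[length-1] empty: answer stays -1

-- ===== PORT B =====
-- Source B's "v = ndp.get(k); if v is None or cand < v: ndp[k] = cand"
def relaxB (ndp : PySem.Dict Int Int) (k cand : Int) : PySem.Dict Int Int :=
  match PySem.Dict.get? ndp k with
  | none => PySem.Dict.insert ndp k cand
  | some v => if cand < v then PySem.Dict.insert ndp k cand else ndp

-- Source B's inner loop body for one stored pair (a, b)
def childB (n m ai bi : Int) (ndp : PySem.Dict Int Int) (p : Int × Int) : PySem.Dict Int Int :=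
  if p.2 + bi < m then
    relaxB (if p.1 + ai < n then relaxB ndp (p.1 + ai) p.2 else ndp) p.1 (p.2 + bi)
  else (if p.1 + ai < n then relaxB ndp (p.1 + ai) p.2 else ndp)

-- one iteration of Source B's outer loop: ndp from dp
def stepB (n m ai bi : Int) (dp : PySem.Dict Int Int) : PySem.Dict Int Int :=
  dp.items.foldl (childB n m ai bi) PySem.Dict.empty

def solution_alt (info : List (List Int)) (n : Int) (m : Int) : Int :=
  let dp := info.foldl (fun dp item =>
      stepB n m (PySem.List.pyGetD item 0 0) (PySem.List.pyGetD item 1 0) dp)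
    (PySem.Dict.insert PySem.Dict.empty 0 0)
  match PySem.List.min? (PySem.Dict.keys dp) (fun k => k) with
  | some k => k     -- min(dp)
  | none => -1      -- dp empty

-- ===== PRECONDITION & SPEC =====
-- Pre_ excludes empty info, on which A raises IndexError, and rows with fewer than two
-- entries, on which A raises whenever it reads the row while B reads every row and so
-- raises even when A's DP set is already empty (see the cite in claim.json).
def Pre_solution (info : List (List Int)) (n : Int) (m : Int) : Prop :=
  info ≠ [] ∧ ∀ row ∈ info, 2 ≤ row.length
instance (info : List (List Int)) (n : Int) (m : Int) : Decidable (Pre_solution info n m) := by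
  unfold Pre_solution; infer_instance

def pvWitness_solution : List (List Int) × Int × Int := ([[2, 3], [1, 2]], 4, 4)

def Spec_solution (info : List (List Int)) (n : Int) (m : Int) (out : Int) : Prop := out = solution_alt info n m
instance (info : List (List Int)) (n : Int) (m : Int) (out : Int) : Decidable (Spec_solution info n m out) := by unfold Spec_solution; infer_instance

-- ===== CLAIM (what is proved, stated in full; the proofs are below) =====
def Claim_equal_solution : Prop := ∀ (info : List (List Int)) (n : Int) (m : Int), Dom_solution info n m → Pre_solution info n m → Spec_solution info n m (solution info n m)

-- ===== LEMMAS AND PROOFS =====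

-- The simulation invariant: D stores, for every A-evidence total reachable in S, the
-- minimum B-evidence with which it is reachable — and nothing else.
def InvSim (S : PySem.Set (Int × Int)) (D : PySem.Dict Int Int) : Prop :=
  (∀ p ∈ S, ∃ v, D.get? p.1 = some v ∧ v ≤ p.2) ∧
  (∀ k v, D.get? k = some v → (k, v) ∈ S) ∧
  D.keys.Nodup

-- membership in A's fold
lemma mem_childA (n m ai bi : Int) (cur : PySem.Set (Int × Int)) (data q : Int × Int) :
    q ∈ childA n m ai bi cur data ↔
      q ∈ cur ∨ (q = (data.1 + ai, data.2) ∧ data.1 + ai < n) ∨ (q = (data.1, data.2 + bi) ∧ data.2 + bi < m) := by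
  unfold childA
  by_cases h1 : data.1 + ai < n <;> by_cases h2 : data.2 + bi < m <;>
simp [h1, h2, PySem.Set.mem_add] <;> tauto

lemma mem_foldl_childA (n m ai bi : Int) (L : List (Int × Int)) (acc : PySem.Set (Int × Int)) (q : Int × Int) :
    q ∈ L.foldl (childA n m ai bi) acc ↔
      q ∈ acc ∨ ∃ p ∈ L, (q = (p.1 + ai, p.2) ∧ p.1 + ai < n) ∨ (q = (p.1, p.2 + bi) ∧ p.2 + bi < m) := by
  induction L generalizing acc with
  | nil => simp
  | cons h t ih =>
    simp only [List.foldl_cons, ih, mem_childA, List.mem_cons]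
    constructor
    · rintro ((hq | hr | hr) | ⟨p, hp, hr⟩)
      · exact Or.inl hq
      · exact Or.inr ⟨h, Or.inl rfl, Or.inl hr⟩
      · exact Or.inr ⟨h, Or.inl rfl, Or.inr hr⟩
      · exact Or.inr ⟨p, Or.inr hp, hr⟩
    · rintro (hq | ⟨p, rfl | hp, hr⟩)
      · exact Or.inl (Or.inl hq)
      · exact Or.inl (Or.inr hr)
      · exact Or.inr ⟨p, hp, hr⟩

-- lookups in relaxB
lemma relaxB_get?_of_ne (d : PySem.Dict Int Int) (k cand k' : Int) (h : k' ≠ k) :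
    (relaxB d k cand).get? k' = d.get? k' := by
  rcases hd : d.get? k with _ | v
  · simp only [relaxB, hd]; exact PySem.Dict.get?_insert_of_ne d cand h
  · by_cases hlt : cand < v
    · simp only [relaxB, hd, if_pos hlt]; exact PySem.Dict.get?_insert_of_ne d cand h
    · simp only [relaxB, hd, if_neg hlt]

lemma relaxB_get?_self (d : PySem.Dict Int Int) (k cand : Int) :
    ∃ w, (relaxB d k cand).get? k = some w ∧ w ≤ cand ∧ (d.get? k = some w ∨ w = cand) := by
  rcases hd : d.get? k with _ | v
  · exact ⟨cand, by simp [relaxB, hd, PySem.Dict.get?_insert_self], le_refl _, Or.inr rfl⟩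
  · by_cases hlt : cand < v
    · exact ⟨cand, by simp [relaxB, hd, hlt, PySem.Dict.get?_insert_self], le_refl _, Or.inr rfl⟩
    · exact ⟨v, by simp [relaxB, hd, hlt], by omega, Or.inl rfl⟩

lemma relaxB_mono (d : PySem.Dict Int Int) (k cand k' w : Int) (h : d.get? k' = some w) :
    ∃ w', (relaxB d k cand).get? k' = some w' ∧ w' ≤ w := by
  by_cases hk : k' = k
  · subst hk
    by_cases hlt : cand < w
    · exact ⟨cand, by simp [relaxB, h, hlt, PySem.Dict.get?_insert_self], by omega⟩
    · exact ⟨w, by simp [relaxB, h, hlt], le_refl _⟩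
  · exact ⟨w, by rw [relaxB_get?_of_ne _ _ _ _ hk]; exact h, le_refl _⟩

lemma relaxB_origin (d : PySem.Dict Int Int) (k cand k' w : Int)
    (h : (relaxB d k cand).get? k' = some w) :
    d.get? k' = some w ∨ (k' = k ∧ w = cand) := by
  by_cases hk : k' = k
  · subst hk
    rcases hd : d.get? k' with _ | v
    · simp only [relaxB, hd, PySem.Dict.get?_insert_self] at h
      right; exact ⟨rfl, by injection h with h'; omega⟩
    · by_cases hlt : cand < v
      · simp only [relaxB, hd, if_pos hlt, PySem.Dict.get?_insert_self] at h
        right; exact ⟨rfl, by injection h with h'; omega⟩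
      · simp only [relaxB, hd, if_neg hlt] at h
        left; exact h
  · rw [relaxB_get?_of_ne _ _ _ _ hk] at h; exact Or.inl h

lemma relaxB_nodup (d : PySem.Dict Int Int) (k cand : Int) (h : d.keys.Nodup) :
    (relaxB d k cand).keys.Nodup := by
  rcases hd : d.get? k with _ | v
  · simp only [relaxB, hd]; exact PySem.Dict.nodup_keys_insert _ _ _ h
  · by_cases hlt : cand < v
    · simp only [relaxB, hd, if_pos hlt]; exact PySem.Dict.nodup_keys_insert _ _ _ h
    · simp only [relaxB, hd, if_neg hlt]; exact h

-- childB: values never increase, keys never disappear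
lemma childB_mono (n m ai bi : Int) (d : PySem.Dict Int Int) (p : Int × Int) (k w : Int)
    (h : d.get? k = some w) :
    ∃ w', (childB n m ai bi d p).get? k = some w' ∧ w' ≤ w := by
  unfold childB
  obtain ⟨w1, h1, hle1⟩ :
      ∃ w1, (if p.1 + ai < n then relaxB d (p.1 + ai) p.2 else d).get? k = some w1 ∧ w1 ≤ w := by
    split
    · exact relaxB_mono _ _ _ _ _ h
    · exact ⟨w, h, le_refl _⟩
  split
  · obtain ⟨w2, h2, hle2⟩ := relaxB_mono _ _ _ _ _ h1
    exact ⟨w2, h2, le_trans hle2 hle1⟩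
  · exact ⟨w1, h1, hle1⟩

lemma childB_origin (n m ai bi : Int) (d : PySem.Dict Int Int) (p : Int × Int) (k w : Int)
    (h : (childB n m ai bi d p).get? k = some w) :
    d.get? k = some w ∨ (k = p.1 + ai ∧ w = p.2 ∧ p.1 + ai < n) ∨ (k = p.1 ∧ w = p.2 + bi ∧ p.2 + bi < m) := by
  unfold childB at h
  by_cases hm : p.2 + bi < m
  · rw [if_pos hm] at h
    rcases relaxB_origin _ _ _ _ _ h with h1 | ⟨rfl, rfl⟩
    · by_cases hn : p.1 + ai < n
      · rw [if_pos hn] at h1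
        rcases relaxB_origin _ _ _ _ _ h1 with h2 | ⟨rfl, rfl⟩
        · exact Or.inl h2
        · exact Or.inr (Or.inl ⟨rfl, rfl, hn⟩)
      · rw [if_neg hn] at h1; exact Or.inl h1
    · exact Or.inr (Or.inr ⟨rfl, rfl, hm⟩)
  · rw [if_neg hm] at h
    by_cases hn : p.1 + ai < n
    · rw [if_pos hn] at h
      rcases relaxB_origin _ _ _ _ _ h with h2 | ⟨rfl, rfl⟩
      · exact Or.inl h2
      · exact Or.inr (Or.inl ⟨rfl, rfl, hn⟩)
    · rw [if_neg hn] at h; exact Or.inl h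

lemma childB_candA (n m ai bi : Int) (d : PySem.Dict Int Int) (p : Int × Int) (hn : p.1 + ai < n) :
    ∃ w, (childB n m ai bi d p).get? (p.1 + ai) = some w ∧ w ≤ p.2 := by
  obtain ⟨w, hw, hle, -⟩ := relaxB_get?_self d (p.1 + ai) p.2
  unfold childB
  rw [if_pos hn]
  split
  · obtain ⟨w2, h2, hle2⟩ := relaxB_mono _ _ _ _ _ hw
    exact ⟨w2, h2, le_trans hle2 hle⟩
  · exact ⟨w, hw, hle⟩

lemma childB_candB (n m ai bi : Int) (d : PySem.Dict Int Int) (p : Int × Int) (hm : p.2 + bi < m) :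
    ∃ w, (childB n m ai bi d p).get? p.1 = some w ∧ w ≤ p.2 + bi := by
  unfold childB
  rw [if_pos hm]
  obtain ⟨w, hw, hle, -⟩ := relaxB_get?_self (if p.1 + ai < n then relaxB d (p.1 + ai) p.2 else d) p.1 (p.2 + bi)
  exact ⟨w, hw, hle⟩

lemma childB_nodup (n m ai bi : Int) (d : PySem.Dict Int Int) (p : Int × Int) (h : d.keys.Nodup) :
    (childB n m ai bi d p).keys.Nodup := by
  unfold childB
  split
  · apply relaxB_nodup
    split
    · exact relaxB_nodup _ _ _ h
    · exact h
  · split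
    · exact relaxB_nodup _ _ _ h
    · exact h

-- the same three facts across B's whole inner loop
lemma foldl_childB_mono (n m ai bi : Int) (L : List (Int × Int)) (acc : PySem.Dict Int Int) (k w : Int)
    (h : acc.get? k = some w) :
    ∃ w', (L.foldl (childB n m ai bi) acc).get? k = some w' ∧ w' ≤ w := by
  induction L generalizing acc w with
  | nil => exact ⟨w, h, le_refl _⟩
  | cons p t ih =>
    obtain ⟨w1, h1, hle1⟩ := childB_mono n m ai bi acc p k w h
    obtain ⟨w2, h2, hle2⟩ := ih _ _ h1
    exact ⟨w2, h2, le_trans hle2 hle1⟩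

lemma foldl_childB_origin (n m ai bi : Int) (L : List (Int × Int)) (acc : PySem.Dict Int Int) (k w : Int)
    (h : (L.foldl (childB n m ai bi) acc).get? k = some w) :
    acc.get? k = some w ∨
      ∃ p ∈ L, (k = p.1 + ai ∧ w = p.2 ∧ p.1 + ai < n) ∨ (k = p.1 ∧ w = p.2 + bi ∧ p.2 + bi < m) := by
  induction L generalizing acc with
  | nil => exact Or.inl h
  | cons p t ih =>
    rcases ih _ h with h' | ⟨q, hq, hr⟩
    · rcases childB_origin n m ai bi acc p k w h' with h'' | hr
      · exact Or.inl h''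
      · exact Or.inr ⟨p, List.mem_cons_self .., hr⟩
    · exact Or.inr ⟨q, List.mem_cons_of_mem _ hq, hr⟩

lemma foldl_childB_cand (n m ai bi : Int) (L : List (Int × Int)) (acc : PySem.Dict Int Int)
    (p : Int × Int) (hp : p ∈ L) (k v : Int)
    (hr : (k = p.1 + ai ∧ v = p.2 ∧ p.1 + ai < n) ∨ (k = p.1 ∧ v = p.2 + bi ∧ p.2 + bi < m)) :
    ∃ w, (L.foldl (childB n m ai bi) acc).get? k = some w ∧ w ≤ v := by
  induction L generalizing acc with
  | nil => cases hp
  | cons q t ih =>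
    rcases List.mem_cons.mp hp with rfl | hp'
    · have : ∃ w, (childB n m ai bi acc p).get? k = some w ∧ w ≤ v := by
        rcases hr with ⟨rfl, rfl, hn⟩ | ⟨rfl, rfl, hm⟩
        · exact childB_candA n m ai bi acc p hn
        · exact childB_candB n m ai bi acc p hm
      obtain ⟨w, hw, hle⟩ := this
      obtain ⟨w', hw', hle'⟩ := foldl_childB_mono n m ai bi t _ k w hw
      exact ⟨w', by simpa using hw', le_trans hle' hle⟩
    · exact ih _ hp'

lemma foldl_childB_nodup (n m ai bi : Int) (L : List (Int × Int)) (acc : PySem.Dict Int Int)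
    (h : acc.keys.Nodup) : (L.foldl (childB n m ai bi) acc).keys.Nodup := by
  induction L generalizing acc with
  | nil => exact h
  | cons p t ih => exact ih _ (childB_nodup n m ai bi acc p h)

-- one outer-loop step preserves the invariant
lemma InvSim_step (n m ai bi : Int) (S : PySem.Set (Int × Int)) (D : PySem.Dict Int Int)
    (hInv : InvSim S D) : InvSim (stepA n m ai bi S) (stepB n m ai bi D) := by
  obtain ⟨hSD, hDS, hnd⟩ := hInv
  refine ⟨?_, ?_, foldl_childB_nodup _ _ _ _ _ _ (by simp [PySem.Dict.keys_empty])⟩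
  · intro q hq
    rcases (mem_foldl_childA n m ai bi S PySem.Set.empty q).mp hq with h | ⟨p, hp, hr⟩
    · cases h
    · obtain ⟨v, hv, hvle⟩ := hSD p hp
      have hitem : (p.1, v) ∈ D.items := PySem.Dict.mem_items_of_get?_eq_some D hv
      rcases hr with ⟨rfl, hn⟩ | ⟨rfl, hm⟩
      · obtain ⟨w, hw, hwle⟩ := foldl_childB_cand n m ai bi D.items PySem.Dict.empty (p.1, v) hitem
          (p.1 + ai) v (Or.inl ⟨rfl, rfl, hn⟩)
        exact ⟨w, hw, le_trans hwle hvle⟩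
      · obtain ⟨w, hw, hwle⟩ := foldl_childB_cand n m ai bi D.items PySem.Dict.empty (p.1, v) hitem
          p.1 (v + bi) (Or.inr ⟨rfl, rfl, by omega⟩)
        exact ⟨w, hw, by omega⟩
  · intro k v hkv
    rcases foldl_childB_origin n m ai bi D.items PySem.Dict.empty k v hkv with h | ⟨q, hq, hr⟩
    · simp [PySem.Dict.get?_empty] at h
    · have hget : D.get? q.1 = some q.2 := PySem.Dict.get?_of_mem_items D hq hnd
      have hqS : (q.1, q.2) ∈ S := hDS _ _ hget
      apply (mem_foldl_childA n m ai bi S PySem.Set.empty (k, v)).mpr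
      right
      exact ⟨(q.1, q.2), hqS, by rcases hr with ⟨rfl, rfl, hn⟩ | ⟨rfl, rfl, hm⟩ <;> simp_all⟩

-- the invariant across a whole run over the remaining rows
lemma InvSim_fold (n m : Int) (rows : List (List Int)) (S : PySem.Set (Int × Int)) (D : PySem.Dict Int Int)
    (hInv : InvSim S D) :
    InvSim (rows.foldl (fun prev row => stepA n m (PySem.List.pyGetD row 0 0) (PySem.List.pyGetD row 1 0) prev) S)
        (rows.foldl (fun dp item => stepB n m (PySem.List.pyGetD item 0 0) (PySem.List.pyGetD item 1 0) dp) D) := by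
  induction rows generalizing S D with
  | nil => exact hInv
  | cons r t ih => exact ih _ _ (InvSim_step _ _ _ _ _ _ hInv)

-- the invariant forces equal final answers
lemma InvSim_answer (S : PySem.Set (Int × Int)) (D : PySem.Dict Int Int) (hInv : InvSim S D) :
    (match PySem.List.min? S (fun x => x.1) with
     | some p => p.1
     | none => (-1 : Int)) =
    (match PySem.List.min? D.keys (fun k => k) with
     | some k => k
     | none => (-1 : Int)) := by
  obtain ⟨hSD, hDS, _⟩ := hInv
  have keymem : ∀ k ∈ D.keys, ∃ v, D.get? k = some v := by
    intro k hk
    cases hg : D.get? k with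
    | none => exact absurd ((PySem.Dict.get?_eq_none_iff_not_mem_keys _ _).mp hg) (by simp [hk])
    | some v => exact ⟨v, rfl⟩
  cases hS : PySem.List.min? S (fun x => x.1) with
  | none =>
    have : S = [] := (PySem.List.min?_eq_none_iff _ _).mp hS
    subst this
    have : D.keys = [] := by
      apply List.eq_nil_iff_forall_not_mem.mpr
      intro k hk
      obtain ⟨v, hv⟩ := keymem k hk
      exact absurd (hDS _ _ hv) (List.not_mem_nil)
    rw [this]
    simp [(PySem.List.min?_eq_none_iff _ _).mpr rfl]
  | some p =>
    have hpS : p ∈ S := PySem.List.min?_mem hS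
    obtain ⟨v, hv, _⟩ := hSD p hpS
    have hp1 : p.1 ∈ D.keys := by
      by_contra hmem
      rw [← PySem.Dict.get?_eq_none_iff_not_mem_keys] at hmem
      simp [hmem] at hv
    cases hK : PySem.List.min? D.keys (fun k => k) with
    | none =>
      have : D.keys = [] := (PySem.List.min?_eq_none_iff _ _).mp hK
      simp [this] at hp1
    | some k =>
      have hkmem : k ∈ D.keys := PySem.List.min?_mem hK
      obtain ⟨w, hw⟩ := keymem k hkmem
      have hkS : (k, w) ∈ S := hDS _ _ hw
      have h1 : p.1 ≤ k := PySem.List.min?_isMin hS (k, w) hkS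
      have h2 : k ≤ p.1 := PySem.List.min?_isMin hK p.1 hp1
      simp; omega

-- ===== VERDICT (by name: the statement is the Claim_ definition above) =====
theorem solution_spec : Claim_equal_solution := by
  intro info n m _ hpre
  unfold Spec_solution
  obtain ⟨hne, _⟩ := hpre
  match info with
  | [] => exact absurd rfl hne
  | first :: rest =>
    unfold solution solution_alt
    simp only [List.foldl_cons]
    have hbase : InvSim (PySem.Set.add PySem.Set.empty ((0 : Int), (0 : Int)))
        (PySem.Dict.insert PySem.Dict.empty 0 0) := by
      refine ⟨?_, ?_, ?_⟩
      · intro p hp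
        have : p = ((0 : Int), (0 : Int)) := by
          simpa [PySem.Set.empty] using hp
        subst this
        exact ⟨0, PySem.Dict.get?_insert_self _ _ _, le_refl _⟩
      · intro k v hkv
        rw [PySem.Dict.get?_insert] at hkv
        split_ifs at hkv with hk
        · subst hk; simp at hkv; subst hkv; simp [PySem.Set.empty]
        · simp [PySem.Dict.get?_empty] at hkv
      · simp [PySem.Dict.keys_insert_of_not_contains, PySem.Dict.contains_empty, PySem.Dict.keys_empty]
    set a0 := PySem.List.pyGetD first 0 0 with ha0
    set b0 := PySem.List.pyGetD first 1 0 with hb0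
    have hfirst :
        (if b0 < m then PySem.Set.add (if a0 < n then PySem.Set.add PySem.Set.empty (a0, 0) else PySem.Set.empty) (0, b0)
         else (if a0 < n then PySem.Set.add PySem.Set.empty (a0, 0) else PySem.Set.empty)) =
        stepA n m a0 b0 (PySem.Set.add PySem.Set.empty ((0 : Int), (0 : Int))) := by
      simp [stepA, childA, PySem.Set.empty, PySem.Set.add]
    rw [hfirst]
    exact InvSim_answer _ _
      (InvSim_fold n m rest _ _ (InvSim_step n m a0 b0 _ _ hbase))
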